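-- pv_equiv track=rewrite | github.com/Dragon121222/Robots | playground/common/simpleFsm.py | checkUnreachableStates
-- ===== SOURCE A (Python) =====
-- def checkUnreachableStates(state_map: dict[str, set[str]], initial: str) -> set[str]:
--     all_states = set(state_map.keys())
--     for targets in state_map.values():
--         all_states |= targets
--     visited, queue = set(), [initial]
--     while queue:
--         current = queue.pop(0)
--         if current in visited:
--             continue
--         visited.add(current)
--         queue.extend(state_map.get(current, set()) - visited)
--     return all_states - visited
-- ===== SOURCE B (Python) =====
-- def checkUnreachableStates(state_map: dict[str, set[str]], initial: str) -> set[str]: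
--     all_states = set(state_map.keys())
--     for targets in state_map.values():
--         all_states |= targets
--     reachable = {initial}
--     changed = True
--     while changed:
--         new = set()
--         for s in reachable:
--             new |= state_map.get(s, set())
--         changed = not new <= reachable
--         reachable |= new
--     return all_states - reachable
-- ===== Notes on version B (the rewrite author's own statement) =====
-- stated objective: alternative
-- what changed: Replaces the queue-based BFS (pop front, mark visited, extend queue) by a round-based fixed-point saturation: repeatedly union the successor sets of ALL currently reachable states and stop when a round adds nothing; the all_states union and the final set difference are kept.
import Mathlib
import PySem

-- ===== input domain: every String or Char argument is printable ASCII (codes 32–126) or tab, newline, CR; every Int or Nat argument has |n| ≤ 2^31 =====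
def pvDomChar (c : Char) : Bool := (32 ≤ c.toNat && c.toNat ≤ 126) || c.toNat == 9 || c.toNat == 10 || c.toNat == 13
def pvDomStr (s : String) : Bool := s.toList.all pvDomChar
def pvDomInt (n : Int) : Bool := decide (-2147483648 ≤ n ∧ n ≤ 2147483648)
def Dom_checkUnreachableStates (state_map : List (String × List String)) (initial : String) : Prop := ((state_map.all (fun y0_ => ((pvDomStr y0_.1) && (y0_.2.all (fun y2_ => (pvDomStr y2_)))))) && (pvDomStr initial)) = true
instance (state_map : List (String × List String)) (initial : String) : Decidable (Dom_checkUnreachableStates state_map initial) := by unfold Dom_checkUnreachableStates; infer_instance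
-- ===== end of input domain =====

-- B changes the reachability computation from a queue-based BFS to a round-based
-- fixed-point saturation (union of all successors of the current reachable set until
-- stable); same all_states union, same final set difference. Objective: alternative
-- algorithm of similar cost. Both return sets; element order is not part of the claim.

-- ===== PORT A =====

-- universe of states that can ever enter the BFS queue (termination bookkeeping only)
def pvUniv (state_map : List (String × List String)) (initial : String) : List String :=
  initial :: state_map.flatMap (fun p => p.2)

-- any looked-up successor list is made of elements of the flatMap
theorem pvGetD_sub_flatMap (state_map : List (String × List String)) (c : String)
    (x : String) (hx : x ∈ PySem.Dict.getD (PySem.Dict.mk state_map) c []) :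
    x ∈ state_map.flatMap (fun p => p.2) := by
  unfold PySem.Dict.getD PySem.Dict.get? at hx
  cases hfind : List.find? (fun p => p.1 == c) (PySem.Dict.mk state_map).items with
  | none => rw [hfind] at hx; simp at hx
  | some p =>
    rw [hfind] at hx
    simp only [Option.map_some, Option.getD_some] at hx
    have hp : p ∈ state_map := List.mem_of_find?_eq_some hfind
    exact List.mem_flatMap.mpr ⟨p, hp, hx⟩

-- a looked-up successor list is no longer than the flatMap
theorem pvGetD_len_le (state_map : List (String × List String)) (c : String) :
    (PySem.Dict.getD (PySem.Dict.mk state_map) c []).length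
      ≤ (state_map.flatMap (fun p => p.2)).length := by
  unfold PySem.Dict.getD PySem.Dict.get?
  cases hfind : List.find? (fun p => p.1 == c) (PySem.Dict.mk state_map).items with
  | none => simp
  | some p =>
    simp only [Option.map_some, Option.getD_some]
    have hp : p ∈ state_map := List.mem_of_find?_eq_some hfind
    clear hfind
    induction state_map with
    | nil => cases hp
    | cons q t ih =>
      simp only [List.flatMap_cons, List.length_append]
      rcases List.mem_cons.mp hp with h | h
      · subst h; omega
      · have := ih h; omega

-- strict decrease of a filter count when the forbidden set grows by a present element
theorem pvFilterLt {α : Type} (U : List α) (p q : α → Bool)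
    (hpq : ∀ a, q a = true → p a = true)
    (x : α) (hxU : x ∈ U) (hpx : p x = true) (hqx : q x = false) :
    (U.filter q).length < (U.filter p).length := by
  have h1 : U.filter q = (U.filter p).filter q := by
    rw [List.filter_filter]
    apply List.filter_congr
    intro a _
    cases hq : q a with
    | false => simp
    | true => simp [hpq a hq]
  rw [h1]
  apply List.length_filter_lt_length_iff_exists.mpr
  exact ⟨x, List.mem_filter.mpr ⟨hxU, hpx⟩, by simp [hqx]⟩

def pvBfs (state_map : List (String × List String)) (initial : String)
    (visited : PySem.Set String) (queue : List String)
    (hq : ∀ x ∈ queue, x ∈ pvUniv state_map initial) : PySem.Set String :=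
  match queue, hq with
  | [], _ => visited
  | current :: rest, hq =>
    if hvis : PySem.Set.contains visited current then
      pvBfs state_map initial visited rest
        (fun x hx => hq x (List.mem_cons_of_mem _ hx))
    else
      pvBfs state_map initial (PySem.Set.add visited current)
        (rest ++ PySem.Set.diff (PySem.Dict.getD (PySem.Dict.mk state_map) current [])
            (PySem.Set.add visited current))
        (by
          intro x hx
          rcases List.mem_append.mp hx with h | h
          · exact hq x (List.mem_cons_of_mem _ h)
          · have hx' := (PySem.Set.mem_diff _ _ _).mp h
            exact List.mem_cons_of_mem _ (pvGetD_sub_flatMap state_map current x hx'.1))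
termination_by
  ((pvUniv state_map initial).filter (fun u => !(PySem.Set.contains visited u))).length
      * ((pvUniv state_map initial).length + 1) + queue.length
decreasing_by
  · simp only [List.length_cons]; omega
  · have hcur : current ∈ pvUniv state_map initial := hq current List.mem_cons_self
    have hC := pvFilterLt (pvUniv state_map initial)
      (fun u => !(PySem.Set.contains visited u))
      (fun u => !(PySem.Set.contains (PySem.Set.add visited current) u))
      (by
        intro a ha
        show (!PySem.Set.contains visited a) = true
        have ha' : (!PySem.Set.contains (PySem.Set.add visited current) a) = true := ha
        cases hc : PySem.Set.contains visited a with
        | false => rfl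
        | true =>
          have h2 : (PySem.Set.add visited current).contains a = true :=
            (PySem.Set.contains_iff _ _).mpr
              ((PySem.Set.mem_add _ _ _).mpr (Or.inl ((PySem.Set.contains_iff _ _).mp hc)))
          rw [h2] at ha'; simp at ha')
      current hcur
      (by show (!PySem.Set.contains visited current) = true
          cases h : PySem.Set.contains visited current with
          | false => rfl
          | true => exact absurd h hvis)
      (by
        simp only [Bool.not_eq_false']
        exact (PySem.Set.contains_iff _ _).mpr ((PySem.Set.mem_add _ _ _).mpr (Or.inr rfl)))
    have hE : (PySem.Set.diff (PySem.Dict.getD (PySem.Dict.mk state_map) current [])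
        (PySem.Set.add visited current)).length
        ≤ (state_map.flatMap (fun p => p.2)).length := by
      calc _ ≤ (PySem.Dict.getD (PySem.Dict.mk state_map) current []).length := by
              unfold PySem.Set.diff; exact List.length_filter_le _ _
        _ ≤ _ := pvGetD_len_le state_map current
    have hU : (pvUniv state_map initial).length
        = (state_map.flatMap (fun p => p.2)).length + 1 := by
      simp [pvUniv]
    simp only [List.length_append, List.length_cons]
    have hmul : ((List.filter (fun u => !(PySem.Set.contains (PySem.Set.add visited current) u))
          (pvUniv state_map initial)).length + 1) * ((pvUniv state_map initial).length + 1)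
        ≤ (List.filter (fun u => !(PySem.Set.contains visited u))
          (pvUniv state_map initial)).length * ((pvUniv state_map initial).length + 1) :=
      Nat.mul_le_mul_right _ (by omega)
    rw [Nat.succ_mul] at hmul
    omega

def checkUnreachableStates (state_map : List (String × List String)) (initial : String) : List String :=
  let d := PySem.Dict.mk state_map
  let all_states := d.values.foldl (fun acc targets => PySem.Set.union acc targets)
    (PySem.Set.ofList d.keys)
  let visited := pvBfs state_map initial PySem.Set.empty [initial]
    (by intro x hx; simp only [List.mem_singleton] at hx; subst hx; exact List.mem_cons_self)
  PySem.Set.diff all_states visited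

-- ===== PORT B =====

-- new = ⋃ of successor sets of everything currently reachable (the inner for-loop)
def pvRound (state_map : List (String × List String)) (reachable : PySem.Set String) : PySem.Set String :=
  reachable.foldl
    (fun acc s => PySem.Set.union acc (PySem.Dict.getD (PySem.Dict.mk state_map) s []))
    PySem.Set.empty

theorem pvFoldlUnionMem (f : String → List String) (l : List String)
    (acc : PySem.Set String) (x : String) :
    x ∈ l.foldl (fun acc s => PySem.Set.union acc (f s)) acc ↔
      x ∈ acc ∨ ∃ s ∈ l, x ∈ f s := by
  induction l generalizing acc with
  | nil => simp
  | cons a t ih =>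
    simp only [List.foldl_cons, ih, PySem.Set.mem_union, List.mem_cons]
    aesop

theorem pvMem_round (state_map : List (String × List String)) (reachable : PySem.Set String)
    (x : String) : x ∈ pvRound state_map reachable ↔
      ∃ s ∈ reachable, x ∈ PySem.Dict.getD (PySem.Dict.mk state_map) s [] := by
  unfold pvRound
  rw [pvFoldlUnionMem]
  simp [PySem.Set.empty]

def pvSaturate (state_map : List (String × List String)) (initial : String)
    (reachable : PySem.Set String)
    (hr : ∀ x ∈ reachable, x ∈ pvUniv state_map initial) : PySem.Set String :=
  let nw := pvRound state_map reachable
  let changed := !(PySem.Set.issubset nw reachable)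
  let reachable' := PySem.Set.union reachable nw
  if hch : changed then
    pvSaturate state_map initial reachable'
      (by
        intro x hx
        rcases (PySem.Set.mem_union _ _ _).mp hx with h | h
        · exact hr x h
        · rcases (pvMem_round state_map reachable x).mp h with ⟨s, _, hs⟩
          exact List.mem_cons_of_mem _ (pvGetD_sub_flatMap state_map s x hs))
  else reachable'
termination_by
  ((pvUniv state_map initial).filter (fun u => !(PySem.Set.contains reachable u))).length
decreasing_by
  · simp only [changed, nw, Bool.not_eq_eq_eq_not, Bool.not_true] at hch
    rcases List.all_eq_false.mp hch with ⟨x, hxnw, hxr⟩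
    simp only [Bool.not_eq_true] at hxr
    rcases (pvMem_round state_map reachable x).mp hxnw with ⟨s, _, hs⟩
    have hxU : x ∈ pvUniv state_map initial :=
      List.mem_cons_of_mem _ (pvGetD_sub_flatMap state_map s x hs)
    apply pvFilterLt (pvUniv state_map initial)
      (fun u => !(PySem.Set.contains reachable u))
      (fun u => !(PySem.Set.contains (PySem.Set.union reachable (pvRound state_map reachable)) u))
      _ x hxU
    · show (!PySem.Set.contains reachable x) = true
      rw [hxr]; rfl
    · show (!PySem.Set.contains (PySem.Set.union reachable (pvRound state_map reachable)) x) = false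
      have h2 : PySem.Set.contains (PySem.Set.union reachable (pvRound state_map reachable)) x = true :=
        (PySem.Set.contains_iff _ _).mpr ((PySem.Set.mem_union _ _ _).mpr (Or.inr hxnw))
      rw [h2]; rfl
    · intro a ha
      show (!PySem.Set.contains reachable a) = true
      have ha' : (!PySem.Set.contains (PySem.Set.union reachable (pvRound state_map reachable)) a) = true := ha
      cases hc : PySem.Set.contains reachable a with
      | false => rfl
      | true =>
        have h2 : PySem.Set.contains (PySem.Set.union reachable (pvRound state_map reachable)) a = true :=
          (PySem.Set.contains_iff _ _).mpr
            ((PySem.Set.mem_union _ _ _).mpr (Or.inl ((PySem.Set.contains_iff _ _).mp hc)))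
        rw [h2] at ha'; simp at ha'

def checkUnreachableStates_alt (state_map : List (String × List String)) (initial : String) : List String :=
  let d := PySem.Dict.mk state_map
  let all_states := d.values.foldl (fun acc targets => PySem.Set.union acc targets)
    (PySem.Set.ofList d.keys)
  let reachable := pvSaturate state_map initial (PySem.Set.ofList [initial])
    (by intro x hx; simp only [PySem.Set.mem_ofList, List.mem_singleton] at hx; subst hx
        exact List.mem_cons_self)
  PySem.Set.diff all_states reachable

-- ===== PRECONDITION & SPEC =====
def Spec_checkUnreachableStates (state_map : List (String × List String)) (initial : String) (out : List String) : Prop := out = checkUnreachableStates_alt state_map initial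
instance (state_map : List (String × List String)) (initial : String) (out : List String) : Decidable (Spec_checkUnreachableStates state_map initial out) := by unfold Spec_checkUnreachableStates; infer_instance

-- ===== CLAIM (what is proved, stated in full; the proofs are below) =====
def Claim_equal_checkUnreachableStates : Prop := ∀ (state_map : List (String × List String)) (initial : String), Dom_checkUnreachableStates state_map initial → Spec_checkUnreachableStates state_map initial (checkUnreachableStates state_map initial)

-- ===== LEMMAS AND PROOFS =====

-- one edge of the state graph, and reachability from the initial state
def pvReach (state_map : List (String × List String)) (initial x : String) : Prop :=
  Relation.ReflTransGen
    (fun a b => b ∈ PySem.Dict.getD (PySem.Dict.mk state_map) a []) initial x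

-- unfolding lemma for the saturation loop (zeta-reduced form of its equation)
theorem pvSaturate_eq (state_map : List (String × List String)) (initial : String)
    (reachable : PySem.Set String)
    (hr : ∀ x ∈ reachable, x ∈ pvUniv state_map initial) :
    pvSaturate state_map initial reachable hr =
      if _hch : (!(PySem.Set.issubset (pvRound state_map reachable) reachable)) = true then
        pvSaturate state_map initial
          (PySem.Set.union reachable (pvRound state_map reachable))
          (by
            intro x hx
            rcases (PySem.Set.mem_union _ _ _).mp hx with h | h
            · exact hr x h
            · rcases (pvMem_round state_map reachable x).mp h with ⟨s, _, hs⟩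
              exact List.mem_cons_of_mem _ (pvGetD_sub_flatMap state_map s x hs))
      else PySem.Set.union reachable (pvRound state_map reachable) := by
  rw [pvSaturate]

theorem pvBfs_sound (state_map : List (String × List String)) (initial : String)
    (visited : PySem.Set String) (queue : List String)
    (hq : ∀ x ∈ queue, x ∈ pvUniv state_map initial) :
    (∀ x ∈ visited, pvReach state_map initial x) →
    (∀ x ∈ queue, pvReach state_map initial x) →
    ∀ x ∈ pvBfs state_map initial visited queue hq, pvReach state_map initial x := by
  induction visited, queue, hq using pvBfs.induct state_map initial with
  | case1 visited h _ => intro hv hqr; rw [pvBfs]; exact hv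
  | case2 visited current rest hq hvis _ ih =>
    intro hv hqr
    rw [pvBfs, dif_pos hvis]
    exact ih hv (fun x hx => hqr x (List.mem_cons_of_mem _ hx))
  | case3 visited current rest hq hvis _ ih =>
    intro hv hqr
    rw [pvBfs, dif_neg hvis]
    apply ih
    · intro x hx
      rcases (PySem.Set.mem_add _ _ _).mp hx with h | h
      · exact hv x h
      · subst h; exact hqr x List.mem_cons_self
    · intro x hx
      rcases List.mem_append.mp hx with h | h
      · exact hqr x (List.mem_cons_of_mem _ h)
      · have hx' := (PySem.Set.mem_diff _ _ _).mp h
        exact Relation.ReflTransGen.tail (hqr current List.mem_cons_self) hx'.1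

theorem pvBfs_mono (state_map : List (String × List String)) (initial : String)
    (visited : PySem.Set String) (queue : List String)
    (hq : ∀ x ∈ queue, x ∈ pvUniv state_map initial) :
    ∀ x ∈ visited, x ∈ pvBfs state_map initial visited queue hq := by
  induction visited, queue, hq using pvBfs.induct state_map initial with
  | case1 visited h _ => rw [pvBfs]; exact fun x hx => hx
  | case2 visited current rest hq hvis _ ih =>
    rw [pvBfs, dif_pos hvis]; exact ih
  | case3 visited current rest hq hvis _ ih =>
    rw [pvBfs, dif_neg hvis]
    exact fun x hx => ih x ((PySem.Set.mem_add _ _ _).mpr (Or.inl hx))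

theorem pvBfs_queue (state_map : List (String × List String)) (initial : String)
    (visited : PySem.Set String) (queue : List String)
    (hq : ∀ x ∈ queue, x ∈ pvUniv state_map initial) :
    ∀ x ∈ queue, x ∈ pvBfs state_map initial visited queue hq := by
  induction visited, queue, hq using pvBfs.induct state_map initial with
  | case1 visited h _ => exact fun x hx => absurd hx (List.not_mem_nil)
  | case2 visited current rest hq hvis _ ih =>
    rw [pvBfs, dif_pos hvis]
    intro x hx
    rcases List.mem_cons.mp hx with h | h
    · subst h
      exact pvBfs_mono state_map initial visited rest _ x ((PySem.Set.contains_iff _ _).mp hvis)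
    · exact ih x h
  | case3 visited current rest hq hvis _ ih =>
    rw [pvBfs, dif_neg hvis]
    intro x hx
    rcases List.mem_cons.mp hx with h | h
    · subst h
      exact pvBfs_mono state_map initial _ _ _ x ((PySem.Set.mem_add _ _ _).mpr (Or.inr rfl))
    · exact ih x (List.mem_append_left _ h)

theorem pvBfs_closed (state_map : List (String × List String)) (initial : String)
    (visited : PySem.Set String) (queue : List String)
    (hq : ∀ x ∈ queue, x ∈ pvUniv state_map initial) :
    (∀ s ∈ visited, ∀ t ∈ PySem.Dict.getD (PySem.Dict.mk state_map) s [],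
      t ∈ visited ∨ t ∈ queue) →
    ∀ s ∈ pvBfs state_map initial visited queue hq,
      ∀ t ∈ PySem.Dict.getD (PySem.Dict.mk state_map) s [],
        t ∈ pvBfs state_map initial visited queue hq := by
  induction visited, queue, hq using pvBfs.induct state_map initial with
  | case1 visited h _ =>
    intro hinv
    rw [pvBfs]
    intro s hs t ht
    rcases hinv s hs t ht with h1 | h1
    · exact h1
    · exact absurd h1 (List.not_mem_nil)
  | case2 visited current rest hq hvis _ ih =>
    intro hinv
    rw [pvBfs, dif_pos hvis]
    apply ih
    intro s hs t ht
    rcases hinv s hs t ht with h1 | h1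
    · exact Or.inl h1
    · rcases List.mem_cons.mp h1 with h2 | h2
      · subst h2; exact Or.inl ((PySem.Set.contains_iff _ _).mp hvis)
      · exact Or.inr h2
  | case3 visited current rest hq hvis _ ih =>
    intro hinv
    rw [pvBfs, dif_neg hvis]
    apply ih
    intro s hs t ht
    rcases (PySem.Set.mem_add _ _ _).mp hs with h1 | h1
    · rcases hinv s h1 t ht with h2 | h2
      · exact Or.inl ((PySem.Set.mem_add _ _ _).mpr (Or.inl h2))
      · rcases List.mem_cons.mp h2 with h3 | h3
        · subst h3; exact Or.inl ((PySem.Set.mem_add _ _ _).mpr (Or.inr rfl))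
        · exact Or.inr (List.mem_append_left _ h3)
    · rw [h1] at ht
      by_cases h2 : t ∈ PySem.Set.add visited current
      · exact Or.inl h2
      · exact Or.inr (List.mem_append_right _ ((PySem.Set.mem_diff _ _ _).mpr ⟨ht, h2⟩))

theorem pvBfs_iff (state_map : List (String × List String)) (initial : String)
    (h0 : ∀ x ∈ [initial], x ∈ pvUniv state_map initial) (x : String) :
    x ∈ pvBfs state_map initial PySem.Set.empty [initial] h0 ↔
      pvReach state_map initial x := by
  constructor
  · apply pvBfs_sound
    · intro x hx; exact absurd hx (List.not_mem_nil)
    · intro x hx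
      rcases List.mem_singleton.mp hx with rfl
      exact Relation.ReflTransGen.refl
  · intro h
    induction h with
    | refl => exact pvBfs_queue _ _ _ _ _ initial (List.mem_singleton_self initial)
    | tail hab hbc ih =>
      exact pvBfs_closed state_map initial _ _ _
        (fun s hs => absurd hs (List.not_mem_nil)) _ ih _ hbc

theorem pvSat_mono (state_map : List (String × List String)) (initial : String)
    (reachable : PySem.Set String)
    (hr : ∀ x ∈ reachable, x ∈ pvUniv state_map initial) :
    ∀ x ∈ reachable, x ∈ pvSaturate state_map initial reachable hr := by
  induction reachable, hr using pvSaturate.induct state_map initial with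
  | case1 reachable hr nw changed reachable' hch ih =>
    have hch' : (!(PySem.Set.issubset (pvRound state_map reachable) reachable)) = true := hch
    rw [pvSaturate_eq, dif_pos hch']
    exact fun x hx => ih x ((PySem.Set.mem_union _ _ _).mpr (Or.inl hx))
  | case2 reachable hr nw changed hch =>
    have hch' : ¬((!(PySem.Set.issubset (pvRound state_map reachable) reachable)) = true) := hch
    rw [pvSaturate_eq, dif_neg hch']
    exact fun x hx => (PySem.Set.mem_union _ _ _).mpr (Or.inl hx)

theorem pvSat_sound (state_map : List (String × List String)) (initial : String)
    (reachable : PySem.Set String)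
    (hr : ∀ x ∈ reachable, x ∈ pvUniv state_map initial) :
    (∀ x ∈ reachable, pvReach state_map initial x) →
    ∀ x ∈ pvSaturate state_map initial reachable hr, pvReach state_map initial x := by
  induction reachable, hr using pvSaturate.induct state_map initial with
  | case1 reachable hr nw changed reachable' hch ih =>
    intro hre
    have hch' : (!(PySem.Set.issubset (pvRound state_map reachable) reachable)) = true := hch
    rw [pvSaturate_eq, dif_pos hch']
    apply ih
    intro x hx
    rcases (PySem.Set.mem_union _ _ _).mp hx with h | h
    · exact hre x h
    · rcases (pvMem_round state_map reachable x).mp h with ⟨s, hsr, hs⟩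
      exact Relation.ReflTransGen.tail (hre s hsr) hs
  | case2 reachable hr nw changed hch =>
    intro hre
    have hch' : ¬((!(PySem.Set.issubset (pvRound state_map reachable) reachable)) = true) := hch
    rw [pvSaturate_eq, dif_neg hch']
    intro x hx
    rcases (PySem.Set.mem_union _ _ _).mp hx with h | h
    · exact hre x h
    · rcases (pvMem_round state_map reachable x).mp h with ⟨s, hsr, hs⟩
      exact Relation.ReflTransGen.tail (hre s hsr) hs

theorem pvSat_closed (state_map : List (String × List String)) (initial : String)
    (reachable : PySem.Set String)
    (hr : ∀ x ∈ reachable, x ∈ pvUniv state_map initial) :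
    ∀ s ∈ pvSaturate state_map initial reachable hr,
      ∀ t ∈ PySem.Dict.getD (PySem.Dict.mk state_map) s [],
        t ∈ pvSaturate state_map initial reachable hr := by
  induction reachable, hr using pvSaturate.induct state_map initial with
  | case1 reachable hr nw changed reachable' hch ih =>
    have hch' : (!(PySem.Set.issubset (pvRound state_map reachable) reachable)) = true := hch
    rw [pvSaturate_eq, dif_pos hch']
    exact ih
  | case2 reachable hr nw changed hch =>
    have hch' : ¬((!(PySem.Set.issubset (pvRound state_map reachable) reachable)) = true) := hch
    rw [pvSaturate_eq, dif_neg hch']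
    intro s hs t ht
    have hss : PySem.Set.issubset (pvRound state_map reachable) reachable = true := by
      simpa using hch'
    have hsub : ∀ y ∈ pvRound state_map reachable, y ∈ reachable :=
      fun y hy => (PySem.Set.issubset_iff _ _).mp hss y hy
    have hsr : s ∈ reachable := by
      rcases (PySem.Set.mem_union _ _ _).mp hs with h | h
      · exact h
      · exact hsub s h
    exact (PySem.Set.mem_union _ _ _).mpr
      (Or.inl (hsub t ((pvMem_round state_map reachable t).mpr ⟨s, hsr, ht⟩)))

theorem pvSat_iff (state_map : List (String × List String)) (initial : String)
    (h0 : ∀ x ∈ PySem.Set.ofList [initial], x ∈ pvUniv state_map initial) (x : String) :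
    x ∈ pvSaturate state_map initial (PySem.Set.ofList [initial]) h0 ↔
      pvReach state_map initial x := by
  constructor
  · apply pvSat_sound
    intro x hx
    have : x = initial := by
      have := (PySem.Set.mem_ofList _ _).mp hx
      simpa using this
    subst this
    exact Relation.ReflTransGen.refl
  · intro h
    induction h with
    | refl =>
      exact pvSat_mono _ _ _ _ initial ((PySem.Set.mem_ofList _ _).mpr (List.mem_singleton_self initial))
    | tail hab hbc ih =>
      exact pvSat_closed state_map initial _ _ _ ih _ hbc

-- ===== VERDICT (by name: the statement is the Claim_ definition above) =====
theorem checkUnreachableStates_spec : Claim_equal_checkUnreachableStates := by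
  intro state_map initial _
  unfold Spec_checkUnreachableStates checkUnreachableStates checkUnreachableStates_alt
  dsimp only
  unfold PySem.Set.diff
  apply List.filter_congr
  intro x _
  have hmem : (x ∈ pvBfs state_map initial PySem.Set.empty [initial]
        (by intro y hy; simp only [List.mem_singleton] at hy; subst hy; exact List.mem_cons_self)) ↔
      (x ∈ pvSaturate state_map initial (PySem.Set.ofList [initial])
        (by intro y hy; simp only [PySem.Set.mem_ofList, List.mem_singleton] at hy; subst hy
            exact List.mem_cons_self)) := by
    rw [pvBfs_iff, pvSat_iff]
  congr 1
  cases hA : PySem.Set.contains (pvBfs state_map initial PySem.Set.empty [initial] _) x with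
  | true =>
    exact ((PySem.Set.contains_iff _ _).mpr (hmem.mp ((PySem.Set.contains_iff _ _).mp hA))).symm
  | false =>
    cases hB : PySem.Set.contains (pvSaturate state_map initial (PySem.Set.ofList [initial]) _) x with
    | false => rfl
    | true =>
      have hmm := hmem.mpr ((PySem.Set.contains_iff _ _).mp hB)
      have h2 := (PySem.Set.contains_iff _ _).mpr hmm
      rw [hA] at h2
      exact h2
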